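-- pv_equiv track=rewrite | github.com/swm-sink/ai-pod-nobody-knows | podcast_production/agents/audio_validator.py | _generate_mock_transcription
-- ===== SOURCE A (Python) =====
-- def _generate_mock_transcription(script_content: str) -> str:
--     """Generate mock transcription for testing (simulate STT errors)"""
--     # Simulate some common STT errors
--     transcription = script_content
--
--     # Simulate a few word substitutions
--     substitutions = {
--         "fascinating": "facinating",  # Common misspelling
--         "remarkable": "remarkable",    # No change
--         "uncertainty": "uncertainy",   # Missing letter
--     }
--
--     for original, replacement in substitutions.items():
--         transcription = transcription.replace(original, replacement)
--
--     return transcription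
-- ===== SOURCE B (Python) =====
-- def _generate_mock_transcription(script_content: str) -> str:
--     """Generate mock transcription for testing (simulate STT errors)"""
--     # One left-to-right pass: at each position try the substitution keys in
--     # order; on a match emit the replacement and jump past it, else copy the
--     # character.  (Simultaneous substitution; equivalent to the sequential
--     # .replace chain because no replacement re-creates another key.)
--     subs = {
--         "fascinating": "facinating",  # Common misspelling
--         "remarkable": "remarkable",    # No change
--         "uncertainty": "uncertainy",   # Missing letter
--     }
--     out = []
--     i = 0
--     n = len(script_content)
--     while i < n:
--         for key in subs:
--             if script_content.startswith(key, i):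
--                 out.append(subs[key])
--                 i += len(key)
--                 break
--         else:
--             out.append(script_content[i])
--             i += 1
--     return "".join(out)
-- ===== Notes on version B (the rewrite author's own statement) =====
-- stated objective: alternative
-- what changed: Replaces A's three sequential full-string .replace passes (one per dict entry) by a single left-to-right scan that at each position tries the three keys and emits the replacement or copies the character; valid because no replacement text re-creates another key.
import Mathlib
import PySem

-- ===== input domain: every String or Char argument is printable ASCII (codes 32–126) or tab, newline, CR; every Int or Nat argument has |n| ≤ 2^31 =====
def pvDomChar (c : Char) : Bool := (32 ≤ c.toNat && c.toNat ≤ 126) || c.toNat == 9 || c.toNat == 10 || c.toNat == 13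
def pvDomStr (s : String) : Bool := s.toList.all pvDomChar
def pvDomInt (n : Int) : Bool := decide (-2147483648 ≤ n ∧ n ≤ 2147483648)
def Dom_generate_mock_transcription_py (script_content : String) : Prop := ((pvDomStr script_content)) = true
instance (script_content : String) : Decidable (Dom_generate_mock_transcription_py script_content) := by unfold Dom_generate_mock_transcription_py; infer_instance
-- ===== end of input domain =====

-- B replaces A's chain of three sequential full-string .replace passes by a single
-- left-to-right scan that tries the three keys at each position (alternative; same result).

-- ===== PORT A =====
-- A: transcription = script_content; for each (original, replacement) in the dict, transcription = transcription.replace(original, replacement)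
def generate_mock_transcription_py (script_content : String) : String :=
  let substitutions : PySem.Dict String String :=
    ((PySem.Dict.empty.insert "fascinating" "facinating").insert "remarkable" "remarkable").insert "uncertainty" "uncertainy"
  substitutions.items.foldl (fun transcription kv => PySem.Str.replace transcription kv.1 kv.2) script_content

-- ===== PORT B =====
-- B: one left-to-right pass over the characters; at each position try the keys in
-- dict order (startswith), emit the replacement and jump past a match, else copy the
-- character.  pvScanB is the while/for-else loop of Source B on List Char, exact.
def pvScanB : List Char → List Char
  | [] => []
  | c :: t =>
    if ("fascinating".toList).isPrefixOf (c :: t) then "facinating".toList ++ pvScanB (t.drop 10)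
    else if ("remarkable".toList).isPrefixOf (c :: t) then "remarkable".toList ++ pvScanB (t.drop 9)
    else if ("uncertainty".toList).isPrefixOf (c :: t) then "uncertainy".toList ++ pvScanB (t.drop 10)
    else c :: pvScanB t
termination_by l => l.length
decreasing_by
  all_goals simp only [List.length_drop, List.length_cons]
  all_goals omega

def generate_mock_transcription_py_alt (script_content : String) : String :=
  String.ofList (pvScanB script_content.toList)

-- ===== PRECONDITION & SPEC =====
def Spec_generate_mock_transcription_py (script_content : String) (out : String) : Prop := out = generate_mock_transcription_py_alt script_content
instance (script_content : String) (out : String) : Decidable (Spec_generate_mock_transcription_py script_content out) := by unfold Spec_generate_mock_transcription_py; infer_instance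

-- ===== CLAIM (what is proved, stated in full; the proofs are below) =====
def Claim_equal_generate_mock_transcription_py : Prop := ∀ (script_content : String), Dom_generate_mock_transcription_py script_content → Spec_generate_mock_transcription_py script_content (generate_mock_transcription_py script_content)

-- ===== LEMMAS AND PROOFS =====

-- structural characterisation of PySem.Chars.replace (one replacement pass)
def pvRep1 (old new : List Char) : List Char → List Char
  | [] => []
  | c :: t =>
    if old.isPrefixOf (c :: t) then new ++ pvRep1 old new (t.drop (old.length - 1))
    else c :: pvRep1 old new t
termination_by l => l.length
decreasing_by
  all_goals simp only [List.length_drop, List.length_cons]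
  all_goals omega

theorem pvRep1_go (old new : List Char) (hold : old ≠ []) :
    ∀ (fuel : Nat) (l acc : List Char), l.length ≤ fuel →
      PySem.Chars.replace.go old new fuel l acc = acc.reverse ++ pvRep1 old new l := by
  intro fuel
  induction fuel with
  | zero =>
    intro l acc hl
    have : l = [] := by cases l <;> simp_all
    subst this
    simp [PySem.Chars.replace.go, pvRep1]
  | succ n ih =>
    intro l acc hl
    cases l with
    | nil => simp [PySem.Chars.replace.go, pvRep1]
    | cons c t =>
      rw [PySem.Chars.replace.go]
      by_cases hp : old.isPrefixOf (c :: t) = true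
      · rw [if_pos hp]
        have hlen : old.length ≥ 1 := by cases old <;> simp_all
        have hdrop : (c :: t).drop old.length = t.drop (old.length - 1) := by
          cases old with
          | nil => simp_all
          | cons o ot => simp
        have hsz : ((c :: t).drop old.length).length ≤ n := by
          simp only [List.length_drop, List.length_cons] at *
          omega
        rw [ih _ _ hsz, hdrop]
        rw [pvRep1, if_pos hp]
        simp
      · rw [if_neg hp]
        have hsz : t.length ≤ n := by simp at hl; omega
        rw [ih _ _ hsz]
        rw [pvRep1, if_neg hp]
        simp

theorem pvReplace_eq (old new l : List Char) (hold : old ≠ []) :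
    PySem.Chars.replace l old new = pvRep1 old new l := by
  rw [PySem.Chars.replace]
  have : old.isEmpty = false := by cases old <;> simp_all
  rw [this]
  simpa using pvRep1_go old new hold l.length l [] (le_refl _)

-- one replacement step on a block the pattern matches at the front
theorem pvRep1_chunk (o0 : Char) (ot new X : List Char) :
    pvRep1 (o0 :: ot) new ((o0 :: ot) ++ X) = new ++ pvRep1 (o0 :: ot) new X := by
  rw [List.cons_append, pvRep1,
    if_pos (List.isPrefixOf_iff_prefix.mpr (by rw [← List.cons_append]; exact List.prefix_append _ _))]
  have h : ((o0 :: ot : List Char).length - 1) = ot.length := by simp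
  rw [h, List.drop_left]

-- replacing a pattern by itself is the identity
theorem pvRep1_id (o0 : Char) (ot : List Char) :
    ∀ l : List Char, pvRep1 (o0 :: ot) (o0 :: ot) l = l := by
  intro l
  induction hn : l.length using Nat.strong_induction_on generalizing l with
  | _ n ih =>
    cases l with
    | nil => simp [pvRep1]
    | cons c t =>
      by_cases hp : (o0 :: ot).isPrefixOf (c :: t) = true
      · have hpre : (o0 :: ot) <+: (c :: t) := List.isPrefixOf_iff_prefix.mp hp
        have heq : (o0 :: ot) ++ (c :: t).drop (o0 :: ot).length = (c :: t) :=
          List.prefix_iff_eq_append.mp hpre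
        have hlt : ((c :: t).drop (o0 :: ot).length).length < n := by
          subst hn
          simp only [List.length_drop, List.length_cons]
          omega
        conv_lhs => rw [← heq]
        rw [pvRep1_chunk, ih _ hlt _ rfl]
        exact heq
      · rw [pvRep1, if_neg hp]
        have : t.length < n := by subst hn; simp
        rw [ih _ this _ rfl]

-- a pattern with head h0 passes over any block not containing h0
theorem pvRep1_passthru (h0 : Char) (pt rep : List Char) :
    ∀ (P X : List Char), h0 ∉ P →
      pvRep1 (h0 :: pt) rep (P ++ X) = P ++ pvRep1 (h0 :: pt) rep X := by
  intro P
  induction P with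
  | nil => intro X _; simp
  | cons p P' ihp =>
    intro X hh
    have hne : p ≠ h0 := by intro h; exact hh (by simp [h])
    have hnp : (h0 :: pt).isPrefixOf (p :: (P' ++ X)) = false := by
      simp [List.isPrefixOf]
      intro h; exact absurd h.symm hne
    rw [List.cons_append, pvRep1, hnp]
    simp only [Bool.false_eq_true, if_false]
    rw [ihp X (fun h => hh (by simp [h])), List.cons_append]

-- prefix test for a pattern without 'f' is unchanged by the fascinating→facinating pass
theorem pvPrefix_transfer (ft rt : List Char) :
    ∀ (X P : List Char), ('f' : Char) ∉ P →
      P.isPrefixOf (pvRep1 ('f' :: ft) ('f' :: rt) X) = P.isPrefixOf X := by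
  intro X
  induction X with
  | nil => intro P _; simp [pvRep1]
  | cons c t iht =>
    intro P hP
    rw [pvRep1]
    by_cases hp : ('f' :: ft).isPrefixOf (c :: t) = true
    · rw [if_pos hp]
      have hcf : c = 'f' := by
        have := List.isPrefixOf_iff_prefix.mp hp
        rcases this with ⟨u, hu⟩
        cases hu
        rfl
      cases P with
      | nil => simp
      | cons p P' =>
        have hpf : (p == 'f') = false := by
          simp only [beq_eq_false_iff_ne, ne_eq]
          intro h; exact hP (by simp [h])
        subst hcf
        simp [List.isPrefixOf, hpf]
    · rw [if_neg hp]
      cases P with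
      | nil => simp
      | cons p P' =>
        simp only [List.isPrefixOf]
        by_cases hpc : p == c
        · simp only [hpc, Bool.true_and]
          exact iht P' (fun h => hP (by simp [h]))
        · simp [hpc]

-- the two effective passes of A fused equal B's single scan
theorem pvFuse :
    ∀ l : List Char,
      pvRep1 ("uncertainty".toList) ("uncertainy".toList)
        (pvRep1 ("fascinating".toList) ("facinating".toList) l) = pvScanB l := by
  have hfas : ("fascinating".toList : List Char) = 'f' :: "ascinating".toList := by decide
  have hunc : ("uncertainty".toList : List Char) = 'u' :: "ncertainty".toList := by decide
  intro l
  induction hn : l.length using Nat.strong_induction_on generalizing l with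
  | _ n ih =>
    cases l with
    | nil => simp [pvRep1, pvScanB]
    | cons c t =>
      by_cases h1 : ("fascinating".toList).isPrefixOf (c :: t) = true
      · -- fascinating matches
        have hpre := List.isPrefixOf_iff_prefix.mp h1
        have heq : ("fascinating".toList) ++ (c :: t).drop 11 = (c :: t) :=
          List.prefix_iff_eq_append.mp hpre
        have hdrop : (c :: t).drop 11 = t.drop 10 := by simp
        rw [hdrop] at heq
        have hlt : (t.drop 10).length < n := by
          subst hn; simp only [List.length_drop, List.length_cons]; omega
        conv_lhs => rw [← heq]
        rw [hfas, pvRep1_chunk, ← hfas]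
        have hnou : ('u' : Char) ∉ ("facinating".toList : List Char) := by decide
        rw [hunc, pvRep1_passthru _ _ _ _ _ hnou, ← hunc]
        rw [ih _ hlt _ rfl]
        rw [pvScanB, if_pos h1]
      · by_cases h2 : ("remarkable".toList).isPrefixOf (c :: t) = true
        · -- remarkable matches
          have hpre := List.isPrefixOf_iff_prefix.mp h2
          have heq : ("remarkable".toList) ++ (c :: t).drop 10 = (c :: t) :=
            List.prefix_iff_eq_append.mp hpre
          have hdrop : (c :: t).drop 10 = t.drop 9 := by simp
          rw [hdrop] at heq
          have hnof : ('f' : Char) ∉ ("remarkable".toList : List Char) := by decide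
          have hnou : ('u' : Char) ∉ ("remarkable".toList : List Char) := by decide
          have hlt : (t.drop 9).length < n := by
            subst hn; simp only [List.length_drop, List.length_cons]; omega
          conv_lhs => rw [← heq]
          rw [hfas, pvRep1_passthru _ _ _ _ _ hnof, ← hfas]
          rw [hunc, pvRep1_passthru _ _ _ _ _ hnou, ← hunc]
          rw [ih _ hlt _ rfl]
          rw [pvScanB, if_neg h1, if_pos h2]
        · by_cases h3 : ("uncertainty".toList).isPrefixOf (c :: t) = true
          · -- uncertainty matches
            have hpre := List.isPrefixOf_iff_prefix.mp h3
            have heq : ("uncertainty".toList) ++ (c :: t).drop 11 = (c :: t) :=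
              List.prefix_iff_eq_append.mp hpre
            have hdrop : (c :: t).drop 11 = t.drop 10 := by simp
            rw [hdrop] at heq
            have hnof : ('f' : Char) ∉ ("uncertainty".toList : List Char) := by decide
            have hlt : (t.drop 10).length < n := by
              subst hn; simp only [List.length_drop, List.length_cons]; omega
            conv_lhs => rw [← heq]
            rw [hfas, pvRep1_passthru _ _ _ _ _ hnof, ← hfas]
            rw [hunc, pvRep1_chunk, ← hunc]
            rw [ih _ hlt _ rfl]
            rw [pvScanB, if_neg h1, if_neg h2, if_pos h3]
          · -- no key matches at this position
            have hlt : t.length < n := by subst hn; simp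
            rw [pvRep1, if_neg h1]
            have hnof : ('f' : Char) ∉ ("uncertainty".toList : List Char) := by decide
            have hfac : ("facinating".toList : List Char) = 'f' :: "acinating".toList := by decide
            have htest : ("uncertainty".toList).isPrefixOf
                (pvRep1 ("fascinating".toList) ("facinating".toList) (c :: t)) =
                ("uncertainty".toList).isPrefixOf (c :: t) := by
              rw [hfas, hfac]
              exact pvPrefix_transfer _ _ (c :: t) _ hnof
            rw [pvRep1, if_neg h1] at htest
            rw [pvRep1, if_neg (by rw [htest]; exact h3)]
            rw [ih _ hlt _ rfl]
            rw [pvScanB, if_neg h1, if_neg h2, if_neg h3]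

-- A reduced to the three sequential string replaces
theorem pvA_eq (s : String) :
    generate_mock_transcription_py s =
      PySem.Str.replace (PySem.Str.replace (PySem.Str.replace s "fascinating" "facinating")
        "remarkable" "remarkable") "uncertainty" "uncertainy" := by
  rfl

-- ===== VERDICT (by name: the statement is the Claim_ definition above) =====
theorem generate_mock_transcription_py_spec : Claim_equal_generate_mock_transcription_py := by
  intro s _
  unfold Spec_generate_mock_transcription_py generate_mock_transcription_py_alt
  rw [pvA_eq]
  apply String.ext
  simp only [PySem.Str.toList_replace, String.toList_ofList]
  rw [pvReplace_eq _ _ _ (by decide)]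
  rw [pvReplace_eq _ _ _ (by decide)]
  rw [pvReplace_eq _ _ _ (by decide)]
  have hrem : ("remarkable".toList : List Char) = 'r' :: "emarkable".toList := by decide
  rw [hrem, pvRep1_id]
  exact pvFuse s.toList
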